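-- pv_equiv track=rewrite | github.com/GregorySmok/RNE | TASK_23.py | f
-- ===== SOURCE A (Python) =====
-- def f(start, end):
--     if start < end:
--         return 0
--     if start == end:
--         return 1
--     s = 0
--     for el in str(start):
--         s += int(el)
--     return f(start - s, end) + f(start - int(str(start**2)[0]), end)
-- ===== SOURCE B (Python) =====
-- def f(start, end):
--     # Bottom-up DP: one pass from end up to start; tab[i] = number of paths from end+i to end.
--     if start < end:
--         return 0
--     if start == end:
--         return 1
--     tab = [1]
--     for v in range(end + 1, start + 1):
--         s = sum(int(c) for c in str(v))
--         d = int(str(v ** 2)[0])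
--         i = len(tab)
--         a = tab[i - s] if i - s >= 0 else 0
--         b = tab[i - d] if i - d >= 0 else 0
--         tab.append(a + b)
--     return tab[start - end]
-- ===== Notes on version B (the rewrite author's own statement) =====
-- stated objective: alternative
-- what changed: Replaced A's two-branch recursion (which recomputes overlapping subproblems) by a single bottom-up dynamic-programming pass that fills a table of path counts for every value from end up to start.
import Mathlib
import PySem

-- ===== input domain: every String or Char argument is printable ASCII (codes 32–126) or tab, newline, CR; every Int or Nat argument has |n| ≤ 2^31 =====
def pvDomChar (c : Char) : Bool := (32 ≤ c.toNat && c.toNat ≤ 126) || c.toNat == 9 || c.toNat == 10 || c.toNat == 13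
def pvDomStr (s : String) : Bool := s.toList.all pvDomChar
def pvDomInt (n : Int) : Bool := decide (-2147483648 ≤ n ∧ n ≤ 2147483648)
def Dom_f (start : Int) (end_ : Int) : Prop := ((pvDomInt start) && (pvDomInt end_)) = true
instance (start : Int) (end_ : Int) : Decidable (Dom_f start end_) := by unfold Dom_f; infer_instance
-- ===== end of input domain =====

-- B replaces A's two-branch recursion by a single bottom-up pass that tabulates the
-- path count for every value from end_ up to start (objective: alternative algorithm).

-- ===== PORT A =====
-- s = sum of int(el) for el in str(n)  (int('-') raises in Python: those inputs are outside Pre_f)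
def digsum (n : Int) : Int :=
  (PySem.Int.toChars n).foldl (fun s c => s + ((PySem.Int.ofChars? [c]).getD 0)) 0

-- int(str(n**2)[0])
def firstdig (n : Int) : Int :=
  ((PySem.List.pyGet? (PySem.Int.toChars (n ^ 2)) 0).map
      (fun c => (PySem.Int.ofChars? [c]).getD 0)).getD 0

-- A's recursion.  The dite guard only makes the recursion well-founded: inside Pre_f it
-- always holds (both decrements are ≥ 1), so on Pre_f this is exactly A's recursion;
-- where it fails, Python's f never returns (ValueError or non-termination).
def f (start : Int) (end_ : Int) : Int :=
  if h1 : start < end_ then 0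
  else if h2 : start = end_ then 1
  else if h : 1 ≤ digsum start ∧ 1 ≤ firstdig start ∧ 0 ≤ end_ then
    f (start - digsum start) end_ + f (start - firstdig start) end_
  else 0
termination_by (start - end_).toNat
decreasing_by
  · omega
  · omega

-- ===== PORT B =====
-- sum(int(c) for c in str(v)) : none where int() raises ValueError (aborts the loop)
def digsumB? (n : Int) : Option Int :=
  (PySem.Int.toChars n).foldlM (fun s c => (PySem.Int.ofChars? [c]).map (fun d => s + d)) 0

-- int(str(v ** 2)[0])
def firstdigB? (n : Int) : Option Int :=
  (PySem.List.pyGet? (PySem.Int.toChars (n ^ 2)) 0).bind fun c => PySem.Int.ofChars? [c]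

-- the 'for v in range(end+1, start+1)' loop of Source B, iteration count as fuel
def loopB : Nat → Int → Array Int → Option (Array Int)
  | 0, _, tab => some tab
  | k + 1, v, tab =>
    match digsumB? v, firstdigB? v with
    | some s, some d =>
      let i : Int := (tab.size : Int)
      let a := if 0 ≤ i - s then tab.getD (i - s).toNat 0 else 0
      let b := if 0 ≤ i - d then tab.getD (i - d).toNat 0 else 0
      loopB k (v + 1) (tab.push (a + b))
    | _, _ => none

def f_alt (start : Int) (end_ : Int) : Int :=
  if start < end_ then 0
  else if start = end_ then 1
  else
    match loopB (start - end_).toNat (end_ + 1) #[1] with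
    | some tab => tab.getD (start - end_).toNat 0  -- tab[start - end]: always in range
    | none => 0  -- a ValueError in Source B: happens only outside Pre_f

-- ===== PRECONDITION & SPEC =====
-- Pre_f excludes start > end_ with end_ < 0: there Python A never returns normally
-- (the recursion reaches a non-positive value v > end_, where int('-') raises
-- ValueError or the recursion never terminates, e.g. f(0, -1)).
def Pre_f (start : Int) (end_ : Int) : Prop := start ≤ end_ ∨ 0 ≤ end_
instance (start : Int) (end_ : Int) : Decidable (Pre_f start end_) := by unfold Pre_f; infer_instance
def pvWitness_f : Int × Int := (12, 2)

def Spec_f (start : Int) (end_ : Int) (out : Int) : Prop := out = f_alt start end_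
instance (start : Int) (end_ : Int) (out : Int) : Decidable (Spec_f start end_ out) := by unfold Spec_f; infer_instance

-- ===== CLAIM (what is proved, stated in full; the proofs are below) =====
def Claim_equal_f : Prop := ∀ (start : Int) (end_ : Int), Dom_f start end_ → Pre_f start end_ → Spec_f start end_ (f start end_)

-- ===== LEMMAS AND PROOFS =====

theorem digitValSome (d : Nat) (hd : d ≤ 9) :
    PySem.Int.ofChars? [Nat.digitChar d] = some (d : Int) := by
  interval_cases d <;> decide

-- every decimal rendering of n < 10^fuel is a nonzero leading digit followed by digits
theorem toDigitsCore_inv : ∀ (fuel n : Nat) (ds : List Char), 0 < fuel → n < 10 ^ fuel →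
    ∃ (c : Nat) (l : List Char),
      Nat.toDigitsCore 10 fuel n ds = (Nat.digitChar c :: l) ++ ds ∧ c ≤ 9 ∧
      (1 ≤ n → 1 ≤ c) ∧ ∀ ch ∈ l, ∃ d, d ≤ 9 ∧ ch = Nat.digitChar d := by
  intro fuel
  induction fuel with
  | zero => intro n ds h; omega
  | succ m ih =>
    intro n ds _ hlt
    by_cases h0 : n / 10 = 0
    · refine ⟨n % 10, [], ?_, by omega, by omega, by simp⟩
      simp [Nat.toDigitsCore, h0]
    · have hm : 0 < m := by
        by_contra hm
        have : m = 0 := by omega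
        subst this; omega
      have hlt' : n / 10 < 10 ^ m := by
        have : n < 10 * 10 ^ m := by
          have := hlt; rw [pow_succ] at this; omega
        omega
      obtain ⟨c, l, heq, hc9, hc1, hl⟩ := ih (n / 10) (Nat.digitChar (n % 10) :: ds) hm hlt'
      refine ⟨c, l ++ [Nat.digitChar (n % 10)], ?_, hc9, fun _ => hc1 (by omega), ?_⟩
      · simp [Nat.toDigitsCore, h0, heq]
      · intro ch hch
        rcases List.mem_append.1 hch with h | h
        · exact hl ch h
        · exact ⟨n % 10, by omega, by simpa using h⟩

theorem toChars_pos (n : Int) (hn : 1 ≤ n) :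
    ∃ (c : Nat) (l : List Char),
      PySem.Int.toChars n = Nat.digitChar c :: l ∧ 1 ≤ c ∧ c ≤ 9 ∧
      ∀ ch ∈ l, ∃ d, d ≤ 9 ∧ ch = Nat.digitChar d := by
  have hneg : ¬ n < 0 := by omega
  have hlt : n.toNat < 10 ^ (n.toNat + 1) := by
    calc n.toNat < 2 ^ (n.toNat + 1) := Nat.lt_two_pow_self.trans (Nat.pow_lt_pow_right (by omega) (by omega))
    _ ≤ 10 ^ (n.toNat + 1) := Nat.pow_le_pow_left (by omega) _
  obtain ⟨c, l, heq, hc9, hc1, hl⟩ := toDigitsCore_inv (n.toNat + 1) n.toNat [] (by omega) hlt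
  refine ⟨c, l, ?_, hc1 (by omega), hc9, hl⟩
  simp only [PySem.Int.toChars, if_neg hneg, Nat.toDigits]
  simpa using heq

theorem digsum_pos (n : Int) (hn : 1 ≤ n) : 1 ≤ digsum n := by
  obtain ⟨c, l, heq, hc1, hc9, hl⟩ := toChars_pos n hn
  unfold digsum
  rw [heq, List.foldl_cons, PySem.List.foldl_add, digitValSome c hc9]
  have : 0 ≤ (l.map fun c => (PySem.Int.ofChars? [c]).getD 0).sum := by
    apply List.sum_nonneg
    intro x hx
    obtain ⟨ch, hch, hval⟩ := List.mem_map.1 hx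
    obtain ⟨d, hd9, rfl⟩ := hl ch hch
    rw [← hval, digitValSome d hd9]
    simp
  simp only [Option.getD_some]
  omega

theorem firstdig_pos (n : Int) (hn : 1 ≤ n) : 1 ≤ firstdig n := by
  have hsq : 1 ≤ n ^ 2 := one_le_pow₀ hn
  obtain ⟨c, l, heq, hc1, hc9, _⟩ := toChars_pos (n ^ 2) hsq
  unfold firstdig
  rw [heq]
  have : PySem.List.pyGet? (Nat.digitChar c :: l) (0 : Int) = some (Nat.digitChar c) := by
    simp [PySem.List.pyGet?, PySem.List.pyIdx?]
  rw [this]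
  simp only [Option.map_some, Option.getD_some, digitValSome c hc9]
  exact_mod_cast hc1

theorem f_lt (start end_ : Int) (h : start < end_) : f start end_ = 0 := by
  rw [f, dif_pos h]

theorem f_self (end_ : Int) : f end_ end_ = 1 := by
  rw [f, dif_neg (lt_irrefl _), dif_pos rfl]

theorem f_step (start end_ : Int) (he : 0 ≤ end_) (h : end_ < start) :
    f start end_ = f (start - digsum start) end_ + f (start - firstdig start) end_ := by
  rw [f, dif_neg (by omega), dif_neg (by omega),
    dif_pos ⟨digsum_pos start (by omega), firstdig_pos start (by omega), he⟩]

-- B's per-element step succeeds on digit strings and computes A's digit sum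
theorem foldlM_digits : ∀ (l : List Char), (∀ ch ∈ l, ∃ d, d ≤ 9 ∧ ch = Nat.digitChar d) →
    ∀ a : Int,
      List.foldlM (fun s c => (PySem.Int.ofChars? [c]).map (fun d => s + d)) a l =
      some (List.foldl (fun s c => s + ((PySem.Int.ofChars? [c]).getD 0)) a l) := by
  intro l
  induction l with
  | nil => intro _ a; rfl
  | cons ch l ih =>
    intro hl a
    obtain ⟨d, hd9, rfl⟩ := hl ch List.mem_cons_self
    rw [List.foldlM_cons, List.foldl_cons, digitValSome d hd9]
    simpa using ih (fun ch hch => hl ch (List.mem_cons_of_mem _ hch)) (a + d)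

theorem digsumB?_eq (n : Int) (hn : 1 ≤ n) : digsumB? n = some (digsum n) := by
  obtain ⟨c, l, heq, hc1, hc9, hl⟩ := toChars_pos n hn
  unfold digsumB? digsum
  rw [heq]
  exact foldlM_digits (Nat.digitChar c :: l)
    (by
      intro ch hch
      rcases List.mem_cons.1 hch with rfl | hch
      · exact ⟨c, hc9, rfl⟩
      · exact hl ch hch) 0

theorem firstdigB?_eq (n : Int) (hn : 1 ≤ n) : firstdigB? n = some (firstdig n) := by
  have hsq : 1 ≤ n ^ 2 := one_le_pow₀ hn
  obtain ⟨c, l, heq, _, hc9, _⟩ := toChars_pos (n ^ 2) hsq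
  unfold firstdigB? firstdig
  rw [heq]
  have hget : PySem.List.pyGet? (Nat.digitChar c :: l) (0 : Int) = some (Nat.digitChar c) := by
    simp [PySem.List.pyGet?, PySem.List.pyIdx?]
  rw [hget]
  simp [digitValSome c hc9]

-- the table Source B has built after processing values end_+1 .. u
def tabL (end_ u : Int) : List Int :=
  (List.range ((u - end_).toNat + 1)).map (fun i : Nat => f (end_ + (i : Int)) end_)

theorem arr_getD (l : List Int) (j : Nat) : l.toArray.getD j 0 = l.getD j 0 := by
  by_cases h : j < l.length
  · simp [Array.getD, h, List.getD_eq_getElem?_getD]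
  · simp [Array.getD, h, List.getD_eq_getElem?_getD]

theorem getD_tabL (end_ u : Int) (j : Nat) :
    (tabL end_ u).getD j 0 = if j ≤ (u - end_).toNat then f (end_ + j) end_ else 0 := by
  unfold tabL
  by_cases hj : j ≤ (u - end_).toNat
  · rw [if_pos hj, List.getD_eq_getElem _ _ (by simpa using by omega), List.getElem_map,
      List.getElem_range]
  · rw [if_neg hj, List.getD_eq_default _ _ (by simpa using by omega)]

theorem tabL_succ (end_ u : Int) (hu : end_ ≤ u) :
    tabL end_ (u + 1) = tabL end_ u ++ [f (u + 1) end_] := by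
  unfold tabL
  have h1 : (u + 1 - end_).toNat + 1 = ((u - end_).toNat + 1) + 1 := by omega
  rw [h1, List.range_succ, List.map_append, List.map_singleton,
    show end_ + (((u - end_).toNat + 1 : Nat) : Int) = u + 1 from by push_cast; omega]

theorem loopB_run (end_ : Int) (he : 0 ≤ end_) :
    ∀ (k : Nat) (u : Int), end_ ≤ u →
      loopB k (u + 1) (tabL end_ u).toArray = some (tabL end_ (u + k)).toArray := by
  intro k
  induction k with
  | zero => intro u _; simp [loopB]
  | succ k ih =>
    intro u hu
    have hv : 1 ≤ u + 1 := by omega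
    rw [loopB, digsumB?_eq (u + 1) hv, firstdigB?_eq (u + 1) hv]
    have hsize : ((tabL end_ u).toArray.size : Int) = u + 1 - end_ := by
      simp [tabL]
      omega
    have hs1 := digsum_pos (u + 1) hv
    have hd1 := firstdig_pos (u + 1) hv
    have conv : ∀ s : Int, 1 ≤ s →
        (if 0 ≤ u + 1 - end_ - s then
            (tabL end_ u).toArray.getD (u + 1 - end_ - s).toNat 0
          else 0) = f (u + 1 - s) end_ := by
      intro s hs
      by_cases hge : 0 ≤ u + 1 - end_ - s
      · rw [if_pos hge, arr_getD, getD_tabL end_ u, if_pos (by omega),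
          show end_ + (((u + 1 - end_ - s).toNat : Nat) : Int) = u + 1 - s from by omega]
      · rw [if_neg hge, f_lt _ _ (by omega)]
    simp only [hsize]
    rw [conv (digsum (u + 1)) hs1, conv (firstdig (u + 1)) hd1,
      ← f_step (u + 1) end_ he (by omega), List.push_toArray, ← tabL_succ end_ u hu]
    have := ih (u + 1) (by omega)
    rw [this]
    have : u + 1 + (k : Int) = u + (k + 1 : Nat) := by push_cast; ring
    rw [this]

-- ===== VERDICT (by name: the statement is the Claim_ definition above) =====
theorem f_spec : Claim_equal_f := by
  intro start end_ _ hpre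
  unfold Spec_f f_alt
  rcases lt_trichotomy start end_ with h | h | h
  · rw [if_pos h, f_lt _ _ h]
  · subst h
    rw [if_neg (lt_irrefl _), if_pos rfl, f_self]
  · have he : 0 ≤ end_ := by rcases hpre with h' | h' <;> omega
    rw [if_neg (by omega), if_neg (by omega)]
    have hinit : (#[1] : Array Int) = (tabL end_ end_).toArray := by
      simp [tabL, f_self]
    rw [hinit, loopB_run end_ he (start - end_).toNat end_ (le_refl _)]
    have hend : end_ + ((start - end_).toNat : Int) = start := by omega
    rw [hend]
    show f start end_ = (tabL end_ start).toArray.getD (start - end_).toNat 0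
    rw [arr_getD, getD_tabL, if_pos (le_refl _), hend]
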